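-- pv_equiv track=rewrite | github.com/Loofy147/Global-theorem- | research/discovery_engine_unified.py | _build_arc_succ_3
-- ===== SOURCE A (Python) =====
-- def _build_arc_succ_3(m: int):
--     n = m**3
--     s = [[0]*3 for _ in range(n)]
--     for idx in range(n):
--         i,rem = divmod(idx, m*m); j,k = divmod(rem, m)
--         s[idx][0] = ((i+1)%m)*m*m + j*m + k
--         s[idx][1] = i*m*m + ((j+1)%m)*m + k
--         s[idx][2] = i*m*m + j*m + (k+1)%m
--     return s
-- ===== SOURCE B (Python) =====
-- def _build_arc_succ_3(m: int):
--     if m <= 0: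
--         return []
--     n = m**3
--     mm = m*m
--     ids = list(range(n))
--     col0 = ids[mm:] + ids[:mm]
--     col1 = [x for t in range(m) for x in ids[t*mm+m:t*mm+mm] + ids[t*mm:t*mm+m]]
--     col2 = [x for t in range(mm) for x in ids[t*m+1:t*m+m] + ids[t*m:t*m+1]]
--     return [list(t) for t in zip(col0, col1, col2)]
-- ===== Notes on version B (the rewrite author's own statement) =====
-- stated objective: alternative
-- what changed: Instead of enumerating cells and computing successor coordinates with modular increments, B builds each of the three successor columns as a whole-array / per-block slice rotation of the flat index list (ids[c:]+ids[:c] pattern) and zips the three columns into rows.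
import Mathlib
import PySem

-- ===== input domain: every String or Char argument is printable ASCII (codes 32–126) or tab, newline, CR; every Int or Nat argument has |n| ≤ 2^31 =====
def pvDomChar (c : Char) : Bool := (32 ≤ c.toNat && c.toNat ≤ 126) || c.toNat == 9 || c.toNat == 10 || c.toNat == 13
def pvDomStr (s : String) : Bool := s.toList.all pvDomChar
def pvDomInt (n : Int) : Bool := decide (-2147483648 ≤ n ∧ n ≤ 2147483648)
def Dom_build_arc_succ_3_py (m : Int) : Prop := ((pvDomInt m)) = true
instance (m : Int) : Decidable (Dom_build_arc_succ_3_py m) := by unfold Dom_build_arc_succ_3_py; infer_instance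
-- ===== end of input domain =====

-- B abandons A's per-cell coordinate decoding: it builds the three successor columns
-- as whole-array / per-block slice rotations of the flat index list and zips them into
-- rows (alternative algorithm, same asymptotic cost).

-- ===== PORT A =====
-- A: n = m**3; preallocate s = [[0]*3]*n; for idx in range(n): (i,rem) = divmod(idx, m*m),
-- (j,k) = divmod(rem, m); write the three successors into s[idx].
-- divmod? is none only when its divisor is 0, which cannot happen while the loop body
-- runs (the loop is nonempty only for m > 0); s is left unchanged on that unreachable branch.
def build_arc_succ_3_py (m : Int) : List (List Int) :=
  let n := m ^ 3
  let s := (PySem.List.pyRange 0 n 1).map (fun _ => ([0, 0, 0] : List Int))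
  (PySem.List.pyRange 0 n 1).foldl (fun s idx =>
    match PySem.Int.divmod? idx (m * m) with
    | none => s
    | some (i, rem) =>
      match PySem.Int.divmod? rem m with
      | none => s
      | some (j, k) =>
        s.set idx.toNat
          [PySem.Int.mod (i + 1) m * (m * m) + j * m + k,
           i * (m * m) + PySem.Int.mod (j + 1) m * m + k,
           i * (m * m) + j * m + PySem.Int.mod (k + 1) m]) s

-- ===== PORT B =====
-- zip(col0, col1, col2) stops at the shortest list, like Python's zip
def pyZip3 : List Int → List Int → List Int → List (Int × Int × Int)
  | a :: as, b :: bs, c :: cs => (a, b, c) :: pyZip3 as bs cs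
  | _, _, _ => []

-- B: early return [] for m <= 0; else ids = list(range(m**3)); col0 = ids[mm:] + ids[:mm]; col1/col2 = per-block slice
-- rotations (comprehensions ported as flatMap); rows = [list(t) for t in zip(col0,col1,col2)].
def build_arc_succ_3_py_alt (m : Int) : List (List Int) :=
  if m ≤ 0 then [] else
  let n := m ^ 3
  let mm := m * m
  let ids := PySem.List.pyRange 0 n 1
  let col0 := PySem.List.slice ids (some mm) none ++ PySem.List.slice ids none (some mm)
  let col1 := (PySem.List.pyRange 0 m 1).flatMap (fun t =>
    PySem.List.slice ids (some (t * mm + m)) (some (t * mm + mm))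
      ++ PySem.List.slice ids (some (t * mm)) (some (t * mm + m)))
  let col2 := (PySem.List.pyRange 0 mm 1).flatMap (fun t =>
    PySem.List.slice ids (some (t * m + 1)) (some (t * m + m))
      ++ PySem.List.slice ids (some (t * m)) (some (t * m + 1)))
  (pyZip3 col0 col1 col2).map (fun x => [x.1, x.2.1, x.2.2])

-- ===== PRECONDITION & SPEC =====
def Spec_build_arc_succ_3_py (m : Int) (out : List (List Int)) : Prop := out = build_arc_succ_3_py_alt m
instance (m : Int) (out : List (List Int)) : Decidable (Spec_build_arc_succ_3_py m out) := by unfold Spec_build_arc_succ_3_py; infer_instance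

-- ===== CLAIM (what is proved, stated in full; the proofs are below) =====
def Claim_equal_build_arc_succ_3_py : Prop := ∀ (m : Int), Dom_build_arc_succ_3_py m → Spec_build_arc_succ_3_py m (build_arc_succ_3_py m)

-- ===== LEMMAS AND PROOFS =====

theorem set_take_succ {α : Type} (s : List α) (i : Nat) (x : α) (h : i < s.length) :
    (s.set i x).take (i + 1) = s.take i ++ [x] := by
  rw [List.set_eq_take_append_cons_drop, if_pos h]
  rw [show i + 1 = (s.take i).length + 1 by simp [Nat.min_eq_left h.le]]
  rw [List.take_append]
  simp

-- A's in-place writes: folding `set idx (g idx)` over range a..n on a list of length n.toNat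
-- keeps the prefix before a and replaces the positions from a on by the mapped values.
theorem foldl_set_pyRange {α : Type} (g : Int → α) (n : Int) (a : Int) (s : List α)
    (ha : 0 ≤ a) (hs : s.length = n.toNat) :
    (PySem.List.pyRange a n 1).foldl (fun s idx => s.set idx.toNat (g idx)) s
      = s.take a.toNat ++ (PySem.List.pyRange a n 1).map g := by
  by_cases h : n ≤ a
  · rw [PySem.List.pyRange_one_eq_nil h]
    simp only [List.foldl_nil, List.map_nil, List.append_nil]
    exact (List.take_of_length_le (by omega)).symm
  · have h' : a < n := lt_of_not_ge h
    rw [PySem.List.pyRange_one_cons h']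
    simp only [List.foldl_cons, List.map_cons]
    rw [foldl_set_pyRange g n (a + 1) (s.set a.toNat (g a)) (by omega) (by simp [hs])]
    rw [show (a + 1).toNat = a.toNat + 1 by omega]
    rw [set_take_succ s a.toNat (g a) (by omega)]
    simp
termination_by (n - a).toNat
decreasing_by omega

theorem A_as_map (m : Int) (hm : 0 < m) :
    build_arc_succ_3_py m
      = (PySem.List.pyRange 0 (m ^ 3) 1).map (fun idx =>
          [PySem.Int.mod (PySem.Int.floordiv idx (m * m) + 1) m * (m * m)
             + PySem.Int.floordiv (PySem.Int.mod idx (m * m)) m * m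
             + PySem.Int.mod (PySem.Int.mod idx (m * m)) m,
           PySem.Int.floordiv idx (m * m) * (m * m)
             + PySem.Int.mod (PySem.Int.floordiv (PySem.Int.mod idx (m * m)) m + 1) m * m
             + PySem.Int.mod (PySem.Int.mod idx (m * m)) m,
           PySem.Int.floordiv idx (m * m) * (m * m)
             + PySem.Int.floordiv (PySem.Int.mod idx (m * m)) m * m
             + PySem.Int.mod (PySem.Int.mod (PySem.Int.mod idx (m * m)) m + 1) m]) := by
  have hmm : m * m ≠ 0 := by positivity
  unfold build_arc_succ_3_py
  simp only [PySem.Int.divmod?, if_neg hmm, if_neg hm.ne']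
  rw [foldl_set_pyRange _ (m ^ 3) 0 _ le_rfl (by simp)]
  simp
  intro a _ _
  simp [PySem.Int.floordiv, PySem.Int.mod, Int.fmod_fmod_of_dvd a (dvd_mul_left m m)]

-- translating a range by a constant
theorem map_add_pyRange (d a b : Int) :
    (PySem.List.pyRange a b 1).map (fun x => x + d) = PySem.List.pyRange (a + d) (b + d) 1 := by
  rw [PySem.List.pyRange_one, PySem.List.pyRange_one, List.map_map]
  rw [show (b + d - (a + d)).toNat = (b - a).toNat by omega]
  apply List.map_congr_left
  intro k _
  simp [Function.comp_apply]; ring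

theorem pyRange_drop (a b : Int) (k : Nat) (h : a + k ≤ b) :
    (PySem.List.pyRange a b 1).drop k = PySem.List.pyRange (a + k) b 1 := by
  apply List.ext_getElem
  · simp [PySem.List.length_pyRange_one]; omega
  · intro i h1 h2
    rw [List.getElem_drop, PySem.List.getElem_pyRange_one, PySem.List.getElem_pyRange_one]
    push_cast; ring

theorem pyRange_take (a b : Int) (k : Nat) (h : a + k ≤ b) :
    (PySem.List.pyRange a b 1).take k = PySem.List.pyRange a (a + k) 1 := by
  apply List.ext_getElem
  · simp [PySem.List.length_pyRange_one]; omega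
  · intro i h1 h2
    rw [List.getElem_take, PySem.List.getElem_pyRange_one, PySem.List.getElem_pyRange_one]

-- a slice of range(0, n) with in-range bounds is range(a, b)
theorem slice_pyRange (n a b : Int) (h0 : 0 ≤ a) (hab : a ≤ b) (hbn : b ≤ n) :
    PySem.List.slice (PySem.List.pyRange 0 n 1) (some a) (some b) = PySem.List.pyRange a b 1 := by
  rw [PySem.List.slice_toNat _ h0 (le_trans h0 hab)]
  rw [pyRange_drop 0 n a.toNat (by omega)]
  rw [pyRange_take (0 + a.toNat) n (b.toNat - a.toNat) (by omega)]
  congr 1 <;> omega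

theorem mod_eq_of_decomp (x q d s : Int) (hq : 0 < q) (hs : 0 ≤ s) (hs2 : s < q)
    (hx : x = d * q + s) : PySem.Int.mod x q = s := by
  have hd : PySem.Int.floordiv x q = d := by
    rw [PySem.Int.floordiv_eq_iff_of_pos hq]
    constructor <;> nlinarith
  have h := PySem.Int.floordiv_mul_add_mod x q
  rw [hd] at h; linarith

-- the rotation identity: mapping r ↦ b + (r+c) % q over range(q) IS the rotated range
theorem map_mod_rot (b c q : Int) (hq : 0 < q) (hc0 : 0 ≤ c) (hcq : c ≤ q) :
    (PySem.List.pyRange 0 q 1).map (fun r => b + PySem.Int.mod (r + c) q)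
      = PySem.List.pyRange (b + c) (b + q) 1 ++ PySem.List.pyRange b (b + c) 1 := by
  rw [PySem.List.pyRange_one_append 0 (q - c) q (by omega) (by omega), List.map_append]
  congr 1
  · have : ∀ r ∈ PySem.List.pyRange 0 (q - c) 1,
        b + PySem.Int.mod (r + c) q = r + (b + c) := by
      intro r hr
      rw [PySem.List.mem_pyRange_one] at hr
      rw [mod_eq_of_decomp (r + c) q 0 (r + c) hq (by omega) (by omega) (by ring)]
      ring
    rw [List.map_congr_left this, map_add_pyRange (b + c) 0 (q - c)]
    congr 1 <;> ring
  · have : ∀ r ∈ PySem.List.pyRange (q - c) q 1,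
        b + PySem.Int.mod (r + c) q = r + (b + c - q) := by
      intro r hr
      rw [PySem.List.mem_pyRange_one] at hr
      rw [mod_eq_of_decomp (r + c) q 1 (r + c - q) hq (by omega) (by omega) (by ring)]
      ring
    rw [List.map_congr_left this, map_add_pyRange (b + c - q) (q - c) q]
    congr 1 <;> ring

theorem range_mul_flatMap {α : Type} (A B : Nat) (f : Nat → α) :
    (List.range (A * B)).map f
      = (List.range A).flatMap (fun i => (List.range B).map (fun r => f (i * B + r))) := by
  induction A with
  | zero => simp
  | succ A ih =>
    rw [Nat.succ_mul, List.range_add, List.range_succ]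
    simp [ih, Function.comp_def]

-- decomposing a map over range(0, a*b) into an outer loop over a and an inner loop over b
theorem map_pyRange_mul {α : Type} (f : Int → α) (a b : Int) (ha : 0 ≤ a) (hb : 0 ≤ b) :
    (PySem.List.pyRange 0 (a * b) 1).map f
      = (PySem.List.pyRange 0 a 1).flatMap (fun i =>
          (PySem.List.pyRange 0 b 1).map (fun r => f (i * b + r))) := by
  rw [PySem.List.pyRange_one, PySem.List.pyRange_one, PySem.List.pyRange_one]
  rw [show (a * b - 0).toNat = (a - 0).toNat * (b - 0).toNat by
        lift a to ℕ using ha; lift b to ℕ using hb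
        rw [sub_zero, sub_zero, sub_zero, ← Nat.cast_mul, Int.toNat_natCast, Int.toNat_natCast, Int.toNat_natCast]]
  rw [range_mul_flatMap]
  rw [List.map_flatMap, List.flatMap_map]
  apply List.flatMap_congr
  intro i _
  simp only [List.map_map]
  apply List.map_congr_left
  intro r _
  simp only [Function.comp_apply]
  congr 1
  have hb' : (((b - 0).toNat) : Int) = b := by omega
  rw [Nat.cast_add, Nat.cast_mul, hb']
  ring

theorem pyZip3_map_map_map {α : Type} (f g h : α → Int) (l : List α) :
    pyZip3 (l.map f) (l.map g) (l.map h) = l.map (fun x => (f x, g x, h x)) := by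
  induction l with
  | nil => rfl
  | cons a l ih => simp [pyZip3, ih]

-- col0 as a pointwise formula over the flat index range
theorem col0_as_map (m : Int) (hm : 0 < m) :
    PySem.List.slice (PySem.List.pyRange 0 (m ^ 3) 1) (some (m * m)) none
        ++ PySem.List.slice (PySem.List.pyRange 0 (m ^ 3) 1) none (some (m * m))
      = (PySem.List.pyRange 0 (m ^ 3) 1).map (fun idx => PySem.Int.mod (idx + m * m) (m ^ 3)) := by
  have h1 : m * m ≤ m ^ 3 := by nlinarith
  have h2 : (0 : Int) < m ^ 3 := by positivity
  rw [PySem.List.slice_from _ (by positivity), PySem.List.slice_to _ (by positivity)]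
  rw [pyRange_drop 0 (m ^ 3) (m * m).toNat (by omega)]
  rw [pyRange_take 0 (m ^ 3) (m * m).toNat (by omega)]
  have hrot := map_mod_rot 0 (m * m) (m ^ 3) h2 (by positivity) h1
  simp only [zero_add] at hrot
  rw [show ((0 : Int) + ((m * m).toNat : Int)) = m * m by rw [Int.toNat_of_nonneg (by positivity : (0:Int) ≤ m * m)]; ring]
  exact hrot.symm

theorem mod_mul_add (t x q : Int) (hq : 0 < q) :
    PySem.Int.mod (t * q + x) q = PySem.Int.mod x q := by
  have h := PySem.Int.floordiv_mul_add_mod x q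
  exact mod_eq_of_decomp _ q (t + PySem.Int.floordiv x q) _ hq
    (PySem.Int.mod_nonneg x hq) (PySem.Int.mod_lt x hq) (by linarith)

theorem floordiv_mul_add (t r q : Int) (hq : 0 < q) (h0 : 0 ≤ r) (h1 : r < q) :
    PySem.Int.floordiv (t * q + r) q = t := by
  rw [PySem.Int.floordiv_eq_iff_of_pos hq]
  constructor <;> nlinarith

-- B's whole value as a single pointwise formula over the flat index range
theorem B_as_map (m : Int) (hm : 0 < m) :
    build_arc_succ_3_py_alt m
      = (PySem.List.pyRange 0 (m ^ 3) 1).map (fun idx =>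
          [PySem.Int.mod (idx + m * m) (m ^ 3),
           m * m * PySem.Int.floordiv idx (m * m) + PySem.Int.mod (idx + m) (m * m),
           m * PySem.Int.floordiv idx m + PySem.Int.mod (idx + 1) m]) := by
  have hmm : (0 : Int) < m * m := by positivity
  have hn : (0 : Int) < m ^ 3 := by positivity
  unfold build_arc_succ_3_py_alt
  rw [if_neg (not_le.mpr hm)]
  simp only []
  rw [col0_as_map m hm]
  have hcol1 : (PySem.List.pyRange 0 m 1).flatMap (fun t =>
        PySem.List.slice (PySem.List.pyRange 0 (m ^ 3) 1) (some (t * (m * m) + m)) (some (t * (m * m) + m * m))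
          ++ PySem.List.slice (PySem.List.pyRange 0 (m ^ 3) 1) (some (t * (m * m))) (some (t * (m * m) + m)))
      = (PySem.List.pyRange 0 (m ^ 3) 1).map (fun idx =>
          m * m * PySem.Int.floordiv idx (m * m) + PySem.Int.mod (idx + m) (m * m)) := by
    rw [show m ^ 3 = m * (m * m) by ring]
    rw [map_pyRange_mul _ m (m * m) hm.le hmm.le]
    apply List.flatMap_congr
    intro t ht
    rw [PySem.List.mem_pyRange_one] at ht
    have hb1 : t * (m * m) + m * m ≤ m * (m * m) := by nlinarith [ht.1, ht.2]
    have hb0 : (0 : Int) ≤ t * (m * m) := by nlinarith [ht.1]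
    rw [slice_pyRange (m * (m * m)) _ _ (by linarith) (by nlinarith) hb1]
    rw [slice_pyRange (m * (m * m)) _ _ hb0 (by linarith) (by nlinarith [hb1, hm])]
    have heq : ∀ r ∈ PySem.List.pyRange 0 (m * m) 1,
        m * m * PySem.Int.floordiv (t * (m * m) + r) (m * m)
            + PySem.Int.mod (t * (m * m) + r + m) (m * m)
          = t * (m * m) + PySem.Int.mod (r + m) (m * m) := by
      intro r hr
      rw [PySem.List.mem_pyRange_one] at hr
      rw [floordiv_mul_add t r (m * m) hmm hr.1 hr.2]
      rw [show t * (m * m) + r + m = t * (m * m) + (r + m) by ring]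
      rw [mod_mul_add t (r + m) (m * m) hmm]
      ring
    rw [List.map_congr_left heq]
    rw [map_mod_rot (t * (m * m)) m (m * m) hmm hm.le (by nlinarith)]
  have hcol2 : (PySem.List.pyRange 0 (m * m) 1).flatMap (fun t =>
        PySem.List.slice (PySem.List.pyRange 0 (m ^ 3) 1) (some (t * m + 1)) (some (t * m + m))
          ++ PySem.List.slice (PySem.List.pyRange 0 (m ^ 3) 1) (some (t * m)) (some (t * m + 1)))
      = (PySem.List.pyRange 0 (m ^ 3) 1).map (fun idx =>
          m * PySem.Int.floordiv idx m + PySem.Int.mod (idx + 1) m) := by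
    rw [show m ^ 3 = m * m * m by ring]
    rw [map_pyRange_mul _ (m * m) m hmm.le hm.le]
    apply List.flatMap_congr
    intro t ht
    rw [PySem.List.mem_pyRange_one] at ht
    have hb1 : t * m + m ≤ m * m * m := by nlinarith [ht.1, ht.2]
    have hb0 : (0 : Int) ≤ t * m := by nlinarith [ht.1]
    rw [slice_pyRange (m * m * m) _ _ (by linarith) (by linarith) hb1]
    rw [slice_pyRange (m * m * m) _ _ hb0 (by linarith) (by nlinarith [hb1, hm])]
    have heq : ∀ r ∈ PySem.List.pyRange 0 m 1,
        m * PySem.Int.floordiv (t * m + r) m + PySem.Int.mod (t * m + r + 1) m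
          = t * m + PySem.Int.mod (r + 1) m := by
      intro r hr
      rw [PySem.List.mem_pyRange_one] at hr
      rw [floordiv_mul_add t r m hm hr.1 hr.2]
      rw [show t * m + r + 1 = t * m + (r + 1) by ring]
      rw [mod_mul_add t (r + 1) m hm]
      ring
    rw [List.map_congr_left heq]
    rw [map_mod_rot (t * m) 1 m hm (by omega) (by omega)]
  rw [hcol1, hcol2]
  rw [pyZip3_map_map_map]
  rw [List.map_map]
  rfl

-- ===== VERDICT (by name: the statement is the Claim_ definition above) =====
theorem build_arc_succ_3_py_spec : Claim_equal_build_arc_succ_3_py := by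
  intro m _
  unfold Spec_build_arc_succ_3_py
  by_cases hm : 0 < m
  · have hmm : (0 : Int) < m * m := by positivity
    have hn : (0 : Int) < m ^ 3 := by positivity
    rw [A_as_map m hm, B_as_map m hm]
    apply List.map_congr_left
    intro idx hidx
    rw [PySem.List.mem_pyRange_one] at hidx
    set I := PySem.Int.floordiv idx (m * m) with hIdef
    set R := PySem.Int.mod idx (m * m) with hRdef
    set J := PySem.Int.floordiv R m with hJdef
    set K := PySem.Int.mod R m with hKdef
    have hIR : I * (m * m) + R = idx := PySem.Int.floordiv_mul_add_mod idx (m * m)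
    have hR0 : 0 ≤ R := PySem.Int.mod_nonneg idx hmm
    have hR1 : R < m * m := PySem.Int.mod_lt idx hmm
    have hJK : J * m + K = R := PySem.Int.floordiv_mul_add_mod R m
    have hK0 : 0 ≤ K := PySem.Int.mod_nonneg R hm
    have hK1 : K < m := PySem.Int.mod_lt R hm
    have hI0 : 0 ≤ I := (PySem.Int.le_floordiv_iff_mul_le hmm).mpr (by linarith [hidx.1])
    have hI1 : I < m := (PySem.Int.floordiv_lt_iff_lt_mul hmm).mpr (by nlinarith [hidx.2])
    have hJ0 : 0 ≤ J := (PySem.Int.le_floordiv_iff_mul_le hm).mpr (by linarith)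
    have hJ1 : J < m := (PySem.Int.floordiv_lt_iff_lt_mul hm).mpr (by linarith)
    have e1 : PySem.Int.mod (I + 1) m * (m * m) + J * m + K
        = PySem.Int.mod (idx + m * m) (m ^ 3) := by
      by_cases hi : I + 1 < m
      · rw [mod_eq_of_decomp (I + 1) m 0 (I + 1) hm (by linarith) hi (by ring)]
        rw [mod_eq_of_decomp (idx + m * m) (m ^ 3) 0 (idx + m * m) hn (by linarith)
          (by nlinarith) (by ring)]
        nlinarith [hIR, hJK]
      · have hIe : I = m - 1 := by omega
        rw [mod_eq_of_decomp (I + 1) m 1 0 hm le_rfl hm (by omega)]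
        rw [mod_eq_of_decomp (idx + m * m) (m ^ 3) 1 R hn hR0 (by nlinarith) (by nlinarith [hIR])]
        linarith [hJK]
    have e2 : I * (m * m) + PySem.Int.mod (J + 1) m * m + K
        = m * m * I + PySem.Int.mod (idx + m) (m * m) := by
      have hsub : PySem.Int.mod (idx + m) (m * m) = PySem.Int.mod (R + m) (m * m) := by
        rw [show idx + m = I * (m * m) + (R + m) by linarith [hIR]]
        exact mod_mul_add I (R + m) (m * m) hmm
      rw [hsub]
      by_cases hj : J + 1 < m
      · rw [mod_eq_of_decomp (J + 1) m 0 (J + 1) hm (by linarith) hj (by ring)]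
        rw [mod_eq_of_decomp (R + m) (m * m) 0 (R + m) hmm (by linarith)
          (by nlinarith [hJK]) (by ring)]
        nlinarith [hJK]
      · have hJe : J = m - 1 := by omega
        rw [mod_eq_of_decomp (J + 1) m 1 0 hm le_rfl hm (by omega)]
        rw [mod_eq_of_decomp (R + m) (m * m) 1 K hmm hK0 (by nlinarith) (by nlinarith [hJK])]
        ring
    have e3 : I * (m * m) + J * m + PySem.Int.mod (K + 1) m
        = m * PySem.Int.floordiv idx m + PySem.Int.mod (idx + 1) m := by
      have hfd : PySem.Int.floordiv idx m = I * m + J := by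
        rw [show idx = (I * m + J) * m + K by nlinarith [hIR, hJK]]
        exact floordiv_mul_add (I * m + J) K m hm hK0 hK1
      have hmd : PySem.Int.mod (idx + 1) m = PySem.Int.mod (K + 1) m := by
        rw [show idx + 1 = (I * m + J) * m + (K + 1) by nlinarith [hIR, hJK]]
        exact mod_mul_add (I * m + J) (K + 1) m hm
      rw [hfd, hmd]; ring
    simp only [List.cons.injEq, and_true]
    exact ⟨e1, e2, e3⟩
  · have hm' : m ≤ 0 := le_of_not_gt hm
    have h3 : m ^ 3 ≤ 0 := by nlinarith [sq_nonneg m]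
    have hmm0 : 0 ≤ m * m := mul_self_nonneg m
    simp [build_arc_succ_3_py, build_arc_succ_3_py_alt, hm',
      PySem.List.pyRange_one_eq_nil h3]
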